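-- pv_equiv track=rewrite | github.com/ariuk44/retake_exam_prep | day_9.py | isPacked
-- ===== SOURCE A (Python) =====
-- def isPacked(arr):
--     i = 0
--     n_len = len(arr)
--     while i < n_len:
--         n = arr[i]
--         if n <= 0:
--             return 0
--         count = 0
--         j = i
--         while j < n_len and arr[j] == n:
--             count += 1
--             j += 1
--         if n != count:
--             return 0
--         k = 0
--         while k < i:
--             if arr[k] == arr[i]:
--                 return 0
--             k += 1
--         i = j
--     return 1
-- ===== SOURCE B (Python) =====
-- def isPacked(arr):
--     # reconstruct-and-compare: a packed array is fully determined by its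
--     # distinct values in order of first appearance; build that canonical
--     # array and test equality.
--     vals = list(dict.fromkeys(arr))
--     if any(v <= 0 for v in vals) or sum(vals) != len(arr):
--         return 0
--     expected = [v for v in vals for _ in range(v)]
--     return 1 if arr == expected else 0
-- ===== Notes on version B (the rewrite author's own statement) =====
-- stated objective: alternative
-- what changed: B never scans runs: it reconstructs the unique candidate packed array from the distinct values in first-appearance order (dict.fromkeys), after cheap guards (positivity, sum of distinct values equals length), and returns 1 iff the input equals that reconstruction; A instead walks the array run by run with an inner run-count loop and a quadratic prefix rescan for duplicates.
import Mathlib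
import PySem

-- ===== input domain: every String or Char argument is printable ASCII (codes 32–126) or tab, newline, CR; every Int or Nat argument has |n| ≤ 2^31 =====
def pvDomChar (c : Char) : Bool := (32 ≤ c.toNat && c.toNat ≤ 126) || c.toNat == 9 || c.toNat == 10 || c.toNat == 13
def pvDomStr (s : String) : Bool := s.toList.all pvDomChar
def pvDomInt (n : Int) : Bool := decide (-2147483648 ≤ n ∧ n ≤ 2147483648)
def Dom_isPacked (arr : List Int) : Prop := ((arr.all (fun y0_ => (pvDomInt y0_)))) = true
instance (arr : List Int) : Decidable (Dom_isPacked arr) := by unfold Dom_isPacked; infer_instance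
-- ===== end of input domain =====

-- B is a different algorithm: it never scans runs — it rebuilds the unique candidate
-- packed array from the distinct values in first-appearance order and compares.

-- ===== PORT A =====
-- inner 'while j < n_len and arr[j] == n: count += 1; j += 1' (all accesses in range, getD is exact)
def aInner (arr : List Int) (n : Int) (count j : Nat) : Nat × Nat :=
  if j < arr.length ∧ arr.getD j 0 = n then aInner arr n (count + 1) (j + 1) else (count, j)
termination_by arr.length - j
decreasing_by omega

-- 'while k < i: if arr[k] == arr[i]: return 0; k += 1'
def aDup (arr : List Int) (i k : Nat) : Bool :=
  if k < i then (if arr.getD k 0 = arr.getD i 0 then true else aDup arr i (k + 1)) else false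
termination_by i - k
decreasing_by omega

-- outer while loop of A; fuel is a totality guard only (each pass moves i past a
-- nonempty run, so arr.length + 1 passes always suffice and fuel never runs out)
def aLoop (arr : List Int) : Nat → Nat → Int
  | 0, _ => 1
  | fuel + 1, i =>
    if i < arr.length then
      let n := arr.getD i 0
      if n ≤ 0 then 0
      else
        let cj := aInner arr n 0 i
        if n ≠ (cj.1 : Int) then 0
        else if aDup arr i 0 then 0
        else aLoop arr fuel cj.2
    else 1

def isPacked (arr : List Int) : Int := aLoop arr (arr.length + 1) 0

-- ===== PORT B =====
-- vals = list(dict.fromkeys(arr)); guards; expected = [v for v in vals for _ in range(v)]; compare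
def isPacked_alt (arr : List Int) : Int :=
  let vals := PySem.List.dedup arr
  if (vals.any fun v => decide (v ≤ 0)) || !(vals.sum == (arr.length : Int)) then 0
  else if arr == vals.flatMap (fun v => List.replicate v.toNat v) then 1 else 0

-- ===== PRECONDITION & SPEC =====
def Spec_isPacked (arr : List Int) (out : Int) : Prop := out = isPacked_alt arr
instance (arr : List Int) (out : Int) : Decidable (Spec_isPacked arr out) := by unfold Spec_isPacked; infer_instance

-- ===== CLAIM (what is proved, stated in full; the proofs are below) =====
def Claim_equal_isPacked : Prop := ∀ (arr : List Int), Dom_isPacked arr → Spec_isPacked arr (isPacked arr)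

-- ===== LEMMAS AND PROOFS =====

-- canonical run table (groupby) and its validation, used only by the proofs
def G : List Int → List (Int × Nat)
  | [] => []
  | x :: xs => (x, (xs.takeWhile (· == x)).length + 1) :: G (xs.dropWhile (· == x))
termination_by l => l.length
decreasing_by
  have := List.length_dropWhile_le (· == x) xs
  simp; omega

def gValidate : List (Int × Nat) → PySem.Set Int → Int
  | [], _ => 1
  | (v, c) :: rest, seen =>
    if v ≤ 0 ∨ (c : Int) ≠ v ∨ PySem.Set.contains seen v then 0
    else gValidate rest (PySem.Set.add seen v)

theorem dropWhile_eq_drop {α : Type} (p : α → Bool) : ∀ (l : List α), l.dropWhile p = l.drop (l.takeWhile p).length := by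
  intro l
  induction l with
  | nil => rfl
  | cons x xs ih =>
    by_cases h : p x = true
    · simp [List.dropWhile_cons, List.takeWhile_cons, h, ih]
    · simp [List.dropWhile_cons, List.takeWhile_cons, h]

theorem aInner_spec (arr : List Int) (n : Int) : ∀ (c j : Nat),
    aInner arr n c j = (c + ((arr.drop j).takeWhile (· == n)).length,
                        j + ((arr.drop j).takeWhile (· == n)).length) := by
  intro c j
  fun_induction aInner arr n c j with
  | case1 c j h ih =>
    obtain ⟨hj, he⟩ := h
    have hdrop : arr.drop j = arr[j] :: arr.drop (j + 1) := (List.getElem_cons_drop hj).symm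
    have hget : arr.getD j 0 = arr[j] := List.getD_eq_getElem arr 0 hj
    have hbeq : (arr[j] == n) = true := by rw [← hget, he]; simp
    rw [ih, hdrop, List.takeWhile_cons, hbeq]
    simp; omega
  | case2 c j h =>
    by_cases hj : j < arr.length
    · have he : ¬ arr.getD j 0 = n := by tauto
      have hdrop : arr.drop j = arr[j] :: arr.drop (j + 1) := (List.getElem_cons_drop hj).symm
      have hget : arr.getD j 0 = arr[j] := List.getD_eq_getElem arr 0 hj
      have hbeq : (arr[j] == n) = false := by rw [← hget]; simpa using he
      rw [hdrop, List.takeWhile_cons, hbeq]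
      simp
    · have : arr.drop j = [] := List.drop_eq_nil_of_le (by omega)
      rw [this]; simp

theorem aDup_spec (arr : List Int) (i : Nat) : ∀ (k : Nat),
    (aDup arr i k = true ↔ ∃ u, k ≤ u ∧ u < i ∧ arr.getD u 0 = arr.getD i 0) := by
  intro k
  fun_induction aDup arr i k with
  | case1 k hk he =>
    simp only [true_iff]
    exact ⟨k, Nat.le_refl k, hk, he⟩
  | case2 k hk he ih =>
    rw [ih]
    constructor
    · rintro ⟨u, h1, h2, h3⟩; exact ⟨u, by omega, h2, h3⟩
    · rintro ⟨u, h1, h2, h3⟩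
      refine ⟨u, ?_, h2, h3⟩
      rcases Nat.eq_or_lt_of_le h1 with h | h
      · exact absurd (h ▸ h3) he
      · omega
  | case3 k hk =>
    constructor
    · intro h; exact absurd h (by simp)
    · rintro ⟨u, h1, h2, _⟩; omega

theorem mem_take_iff (arr : List Int) (i : Nat) (hi : i ≤ arr.length) (v : Int) :
    v ∈ arr.take i ↔ ∃ u, u < i ∧ arr.getD u 0 = v := by
  rw [List.mem_iff_getElem]
  constructor
  · rintro ⟨u, hu, he⟩
    have hlen : (arr.take i).length = i := by simp; omega
    have hu' : u < i := by omega
    refine ⟨u, hu', ?_⟩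
    rw [List.getD_eq_getElem arr 0 (by omega)]
    rw [← he, List.getElem_take]
  · rintro ⟨u, hu, he⟩
    have hlen : (arr.take i).length = i := by simp; omega
    refine ⟨u, by omega, ?_⟩
    rw [List.getElem_take, ← List.getD_eq_getElem arr 0 (by omega), he]

theorem aLoop_eq (arr : List Int) : ∀ (N i : Nat) (seen : PySem.Set Int), arr.length - i < N → i ≤ arr.length →
    (∀ v, PySem.Set.contains seen v = true ↔ v ∈ arr.take i) →
    aLoop arr N i = gValidate (G (arr.drop i)) seen := by
  intro N
  induction N with
  | zero => intro i seen hN; omega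
  | succ N ih =>
    intro i seen hN hi hseen
    by_cases h : i < arr.length
    · -- head run of the suffix
      have hget : arr.getD i 0 = arr[i] := List.getD_eq_getElem arr 0 h
      have hdrop : arr.drop i = arr[i] :: arr.drop (i + 1) := (List.getElem_cons_drop h).symm
      have hbeq : (arr[i] == arr[i]) = true := by simp
      have htw : (arr.drop i).takeWhile (· == arr[i])
               = arr[i] :: (arr.drop (i + 1)).takeWhile (· == arr[i]) := by
        rw [hdrop, List.takeWhile_cons, hbeq]
        simp
      have hdw : (arr.drop i).dropWhile (· == arr[i])
               = (arr.drop (i + 1)).dropWhile (· == arr[i]) := by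
        rw [hdrop, List.dropWhile_cons, hbeq]
        simp
      have hG : G (arr.drop i)
              = (arr[i], ((arr.drop (i + 1)).takeWhile (· == arr[i])).length + 1)
                :: G ((arr.drop (i + 1)).dropWhile (· == arr[i])) := by
        rw [hdrop, G]
      -- abbreviations
      set n : Int := arr[i] with hn
      set m : Nat := ((arr.drop (i + 1)).takeWhile (· == n)).length with hm
      have hinner : aInner arr n 0 i = (m + 1, i + (m + 1)) := by
        rw [aInner_spec, htw]
        simp [hm]
      have hmlen : i + (m + 1) ≤ arr.length := by
        have h1 : m ≤ (arr.drop (i + 1)).length :=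
          (List.takeWhile_prefix (· == n)).length_le
        have h2 : (arr.drop (i + 1)).length = arr.length - (i + 1) := List.length_drop ..
        omega
      have hrec_idx : arr.drop (i + (m + 1)) = (arr.drop (i + 1)).dropWhile (· == n) := by
        rw [dropWhile_eq_drop, ← hm, List.drop_drop]
        congr 1
        omega
      have htake : arr.take (i + (m + 1)) = arr.take i ++ n :: (arr.drop (i + 1)).takeWhile (· == n) := by
        rw [List.take_add, hdrop]
        congr 1
        rw [List.take_succ_cons]
        congr 1
        rw [hm]
        exact (List.prefix_iff_eq_take.mp (List.takeWhile_prefix (· == n))).symm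
      have hdup : aDup arr i 0 = PySem.Set.contains seen n := by
        rw [Bool.eq_iff_iff, aDup_spec, hseen, mem_take_iff arr i (by omega) n]
        constructor
        · rintro ⟨u, _, h2, h3⟩; exact ⟨u, h2, by rw [h3, hget]⟩
        · rintro ⟨u, h2, h3⟩; exact ⟨u, by omega, h2, by rw [h3, hget]⟩
      have hseen' : ∀ v, PySem.Set.contains (PySem.Set.add seen n) v = true ↔ v ∈ arr.take (i + (m + 1)) := by
        intro v
        rw [PySem.Set.contains_iff, PySem.Set.mem_add, htake, List.mem_append, List.mem_cons]
        have hmemtw : v ∈ (arr.drop (i + 1)).takeWhile (· == n) → v = n := by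
          intro hv
          exact eq_of_beq (List.mem_takeWhile_imp (p := (· == n)) hv)
        have hms : v ∈ seen ↔ v ∈ arr.take i := by
          rw [← PySem.Set.contains_iff, hseen]
        constructor
        · rintro (hv | hv)
          · exact Or.inl (hms.mp hv)
          · exact Or.inr (Or.inl hv)
        · rintro (hv | hv | hv)
          · exact Or.inl (hms.mpr hv)
          · exact Or.inr hv
          · exact Or.inr (hmemtw hv)
      -- assemble
      rw [aLoop, if_pos h, hG, gValidate]
      simp only [hget, hinner]
      by_cases h0 : n ≤ 0
      · rw [if_pos h0, if_pos (Or.inl h0)]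
      · rw [if_neg h0]
        by_cases h1 : n = ((m + 1 : Nat) : Int)
        · rw [if_neg (by simpa using h1)]
          by_cases hc : PySem.Set.contains seen n = true
          · rw [if_pos (by rw [hdup]; exact hc), if_pos (Or.inr (Or.inr hc))]
          · have hd : ¬ (aDup arr i 0 = true) := by rw [hdup]; simpa using hc
            rw [if_neg hd,
                if_neg (by rintro (hb | hb | hb)
                           · exact h0 hb
                           · exact hb h1.symm
                           · exact hc hb),
                ← hrec_idx]
            exact ih (i + (m + 1)) (PySem.Set.add seen n) (by omega) hmlen hseen'
        · rw [if_pos (fun he => h1 he), if_pos (Or.inr (Or.inl (fun he => h1 he.symm)))]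
    · have : arr.length ≤ i := by omega
      rw [aLoop, if_neg (by omega), List.drop_eq_nil_of_le this]
      simp [G, gValidate]

-- gValidate returns only 0 or 1
theorem gValidate_mem (rs : List (Int × Nat)) (seen : PySem.Set Int) :
    gValidate rs seen = 0 ∨ gValidate rs seen = 1 := by
  induction rs generalizing seen with
  | nil => right; rfl
  | cons p rest ih =>
    obtain ⟨v, c⟩ := p
    rw [gValidate]
    split_ifs
    · left; rfl
    · exact ih _

-- characterization of gValidate = 1
theorem gValidate_eq_one (rs : List (Int × Nat)) (seen : PySem.Set Int) :
    gValidate rs seen = 1 ↔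
      ((∀ p ∈ rs, 0 < p.1 ∧ (p.2 : Int) = p.1 ∧ p.1 ∉ seen) ∧ (rs.map Prod.fst).Nodup) := by
  induction rs generalizing seen with
  | nil => simp [gValidate]
  | cons p rest ih =>
    obtain ⟨v, c⟩ := p
    rw [gValidate]
    by_cases hb : v ≤ 0 ∨ (c : Int) ≠ v ∨ PySem.Set.contains seen v
    · rw [if_pos hb]
      constructor
      · intro h; exact absurd h (by decide)
      · rintro ⟨hall, _⟩
        obtain ⟨h1, h2, h3⟩ := hall (v, c) (by simp)
        rcases hb with hb | hb | hb
        · omega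
        · exact absurd h2 hb
        · exact absurd ((PySem.Set.contains_iff _ _).mp hb) h3
    · rw [if_neg hb]
      push_neg at hb
      obtain ⟨h1, h2, h3⟩ := hb
      have hvs : v ∉ seen := fun hv => by
        exact absurd ((PySem.Set.contains_iff _ _).mpr hv) (by simpa using h3)
      rw [ih]
      constructor
      · rintro ⟨hall, hnd⟩
        refine ⟨?_, ?_⟩
        · rintro p hp
          rcases List.mem_cons.mp hp with hp | hp
          · subst hp; exact ⟨by omega, h2, hvs⟩
          · obtain ⟨a1, a2, a3⟩ := hall p hp
            exact ⟨a1, a2, fun hm => a3 ((PySem.Set.mem_add _ _ _).mpr (Or.inl hm))⟩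
        · refine List.nodup_cons.mpr ⟨?_, hnd⟩
          intro hm
          obtain ⟨p, hp, hfst⟩ := List.mem_map.mp hm
          obtain ⟨_, _, a3⟩ := hall p hp
          exact a3 ((PySem.Set.mem_add _ _ _).mpr (Or.inr hfst))
      · rintro ⟨hall, hnd⟩
        have hnd' := List.nodup_cons.mp hnd
        refine ⟨?_, hnd'.2⟩
        intro p hp
        obtain ⟨a1, a2, a3⟩ := hall p (List.mem_cons.mpr (Or.inr hp))
        refine ⟨a1, a2, fun hm => ?_⟩
        rcases (PySem.Set.mem_add _ _ _).mp hm with hm | hm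
        · exact a3 hm
        · exact hnd'.1 (hm ▸ List.mem_map.mpr ⟨p, hp, rfl⟩)

-- takeWhile (· == x) is a replicate of x
theorem takeWhile_replicate (x : Int) (l : List Int) :
    l.takeWhile (· == x) = List.replicate (l.takeWhile (· == x)).length x := by
  induction l with
  | nil => rfl
  | cons y ys ih =>
    by_cases h : y = x
    · subst h
      rw [List.takeWhile_cons, if_pos (by simp)]
      simp [List.replicate_succ, ← ih]
    · rw [List.takeWhile_cons, if_neg (by simpa using h)]
      rfl

-- G reconstructs the list
theorem G_flatten : ∀ (arr : List Int), (G arr).flatMap (fun p => List.replicate p.2 p.1) = arr := by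
  intro arr
  fun_induction G arr with
  | case1 => rfl
  | case2 x xs ih =>
    rw [List.flatMap_cons, ih, List.replicate_succ]
    simp only [List.cons_append]
    congr 1
    rw [← takeWhile_replicate]
    exact List.takeWhile_append_dropWhile

-- every element of the flattened replicates is one of the values
theorem mem_flat (vs : List Int) (x : Int)
    (hx : x ∈ vs.flatMap (fun v => List.replicate v.toNat v)) : x ∈ vs := by
  obtain ⟨v, hv, hm⟩ := List.mem_flatMap.mp hx
  rw [List.eq_of_mem_replicate hm]; exact hv

theorem takeWhile_not_mem (v : Int) (t : List Int) (h : v ∉ t) :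
    t.takeWhile (· == v) = [] := by
  cases t with
  | nil => rfl
  | cons y ys =>
    have hy : y ≠ v := fun he => h (he ▸ List.mem_cons_self)
    rw [List.takeWhile_cons, if_neg (by simpa using hy)]

theorem dropWhile_not_mem (v : Int) (t : List Int) (h : v ∉ t) :
    t.dropWhile (· == v) = t := by
  cases t with
  | nil => rfl
  | cons y ys =>
    have hy : y ≠ v := fun he => h (he ▸ List.mem_cons_self)
    rw [List.dropWhile_cons, if_neg (by simpa using hy)]

theorem takeWhile_rep (k : Nat) (v : Int) :
    (List.replicate k v).takeWhile (· == v) = List.replicate k v := by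
  induction k with
  | zero => rfl
  | succ k ih => rw [List.replicate_succ, List.takeWhile_cons, if_pos (by simp), ih]

theorem dropWhile_rep (k : Nat) (v : Int) :
    (List.replicate k v).dropWhile (· == v) = [] := by
  induction k with
  | zero => rfl
  | succ k ih => rw [List.replicate_succ, List.dropWhile_cons, if_pos (by simp), ih]

-- G of a flattened list of runs of distinct positive values
theorem G_flat (vs : List Int) (hpos : ∀ v ∈ vs, 0 < v) (hnd : vs.Nodup) :
    G (vs.flatMap (fun v => List.replicate v.toNat v)) = vs.map (fun v => (v, v.toNat)) := by
  induction vs with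
  | nil =>
    rw [List.flatMap_nil, List.map_nil, G]
  | cons v rest ih =>
    have hv : 0 < v := hpos v (by simp)
    have hnd' := List.nodup_cons.mp hnd
    have hvt : v ∉ rest.flatMap (fun v => List.replicate v.toNat v) :=
      fun hm => hnd'.1 (mem_flat rest v hm)
    have hk : v.toNat = v.toNat - 1 + 1 := by omega
    have hflat : (v :: rest).flatMap (fun v => List.replicate v.toNat v)
               = v :: (List.replicate (v.toNat - 1) v
                       ++ rest.flatMap (fun v => List.replicate v.toNat v)) := by
      rw [List.flatMap_cons, hk, List.replicate_succ]
      simp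
    rw [hflat, G]
    have htw : (List.replicate (v.toNat - 1) v
                ++ rest.flatMap (fun v => List.replicate v.toNat v)).takeWhile (· == v)
             = List.replicate (v.toNat - 1) v := by
      rw [List.takeWhile_append, takeWhile_rep]
      simp [takeWhile_not_mem v _ hvt]
    have hdw : (List.replicate (v.toNat - 1) v
                ++ rest.flatMap (fun v => List.replicate v.toNat v)).dropWhile (· == v)
             = rest.flatMap (fun v => List.replicate v.toNat v) := by
      rw [List.dropWhile_append, dropWhile_rep]
      simp [dropWhile_not_mem v _ hvt]
    rw [htw, hdw, ih (fun w hw => hpos w (by simp [hw])) hnd'.2]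
    simp
    omega

-- folding Set.add over a nonempty replicate adds the value once
theorem foldl_add_replicate (k : Nat) (v : Int) (s : PySem.Set Int) (hk : 0 < k) :
    (List.replicate k v).foldl PySem.Set.add s = PySem.Set.add s v := by
  induction k generalizing s with
  | zero => omega
  | succ k ih =>
    rw [List.replicate_succ, List.foldl_cons]
    rcases Nat.eq_zero_or_pos k with h | h
    · subst h; rfl
    · rw [ih _ h]
      by_cases hm : v ∈ s <;> simp [PySem.Set.add, hm]

-- dedup (= Set.ofList) of the flattened runs recovers the values
theorem ofList_flat (vs : List Int) (s : PySem.Set Int)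
    (hpos : ∀ v ∈ vs, 0 < v) :
    (vs.flatMap (fun v => List.replicate v.toNat v)).foldl PySem.Set.add s
      = vs.foldl PySem.Set.add s := by
  induction vs generalizing s with
  | nil => rfl
  | cons v rest ih =>
    rw [List.flatMap_cons, List.foldl_append,
        foldl_add_replicate _ _ _ (by have := hpos v (by simp); omega),
        List.foldl_cons]
    exact ih _ (fun w hw => hpos w (by simp [hw]))

theorem foldl_add_nodup (vs : List Int) (s : PySem.Set Int) (hnd : vs.Nodup)
    (hdisj : ∀ v ∈ vs, v ∉ s) : vs.foldl PySem.Set.add s = s ++ vs := by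
  induction vs generalizing s with
  | nil => simp
  | cons v rest ih =>
    have hnd' := List.nodup_cons.mp hnd
    have hvs : v ∉ s := hdisj v (by simp)
    have hadd : PySem.Set.add s v = s ++ [v] := by
      simp [PySem.Set.add, hvs]
    rw [List.foldl_cons, hadd, ih _ hnd'.2]
    · simp
    · intro w hw
      simp only [List.mem_append, List.mem_singleton]
      rintro (hws | hwv)
      · exact hdisj w (by simp [hw]) hws
      · exact hnd'.1 (hwv ▸ hw)

-- sum of values equals length of flattened runs (values positive)
theorem length_flat (vs : List Int) (hpos : ∀ v ∈ vs, 0 < v) :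
    ((vs.flatMap (fun v => List.replicate v.toNat v)).length : Int) = vs.sum := by
  induction vs with
  | nil => rfl
  | cons v rest ih =>
    rw [List.flatMap_cons, List.length_append, List.length_replicate, List.sum_cons]
    push_cast
    rw [ih (fun w hw => hpos w (by simp [hw]))]
    have := hpos v (by simp)
    omega

-- the central equivalence: A's run validation succeeds iff B's conditions hold
theorem main_iff (arr : List Int) :
    gValidate (G arr) PySem.Set.empty = 1 ↔
      ((∀ v ∈ PySem.List.dedup arr, 0 < v) ∧ (PySem.List.dedup arr).sum = (arr.length : Int) ∧
        arr = (PySem.List.dedup arr).flatMap (fun v => List.replicate v.toNat v)) := by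
  constructor
  · intro h
    obtain ⟨hall, hnd⟩ := (gValidate_eq_one _ _).mp h
    set vs := (G arr).map Prod.fst with hvs
    have hflat : arr = vs.flatMap (fun v => List.replicate v.toNat v) := by
      conv_lhs => rw [← G_flatten arr]
      rw [hvs, List.flatMap_map]
      apply List.flatMap_congr
      intro p hp
      obtain ⟨h1, h2, _⟩ := hall p hp
      have : p.2 = p.1.toNat := by omega
      rw [this]
    have hposvs : ∀ v ∈ vs, 0 < v := by
      intro v hv
      obtain ⟨p, hp, hfst⟩ := List.mem_map.mp hv
      exact hfst ▸ (hall p hp).1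
    have hded : PySem.List.dedup arr = vs := by
      rw [PySem.List.dedup_eq_ofList, hflat]
      show (vs.flatMap _).foldl PySem.Set.add PySem.Set.empty = vs
      rw [ofList_flat vs _ hposvs, foldl_add_nodup vs _ hnd (by simp [PySem.Set.empty])]
      rfl
    refine ⟨hded ▸ hposvs, ?_, hded ▸ hflat⟩
    rw [hded, ← length_flat vs hposvs, ← hflat]
  · rintro ⟨hpos, _, hflat⟩
    have hnd : (PySem.List.dedup arr).Nodup := PySem.List.nodup_dedup arr
    have hG : G arr = (PySem.List.dedup arr).map (fun v => (v, v.toNat)) := by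
      conv_lhs => rw [hflat]
      exact G_flat _ hpos hnd
    rw [gValidate_eq_one, hG]
    refine ⟨?_, ?_⟩
    · intro p hp
      obtain ⟨v, hv, hpe⟩ := List.mem_map.mp hp
      subst hpe
      have := hpos v hv
      refine ⟨this, by simp; omega, by simp [PySem.Set.empty]⟩
    · rw [List.map_map]
      have hid : (Prod.fst ∘ fun v : Int => (v, v.toNat)) = id := rfl
      rw [hid, List.map_id]
      exact hnd

-- B's port returns 1 exactly under the same conditions
theorem alt_eq_one (arr : List Int) :
    isPacked_alt arr = 1 ↔
      ((∀ v ∈ PySem.List.dedup arr, 0 < v) ∧ (PySem.List.dedup arr).sum = (arr.length : Int) ∧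
        arr = (PySem.List.dedup arr).flatMap (fun v => List.replicate v.toNat v)) := by
  unfold isPacked_alt
  simp only []
  by_cases hg : ((PySem.List.dedup arr).any fun v => decide (v ≤ 0)) || !((PySem.List.dedup arr).sum == (arr.length : Int))
  · rw [if_pos hg]
    simp only [Bool.or_eq_true, List.any_eq_true, decide_eq_true_eq, Bool.not_eq_true',
      beq_eq_false_iff_ne] at hg
    constructor
    · intro h; exact absurd h (by decide)
    · rintro ⟨h1, h2, _⟩
      rcases hg with ⟨v, hv, hle⟩ | hne
      · exact absurd (h1 v hv) (by omega)
      · exact absurd h2 hne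
  · rw [if_neg hg]
    simp only [Bool.or_eq_true, List.any_eq_true, decide_eq_true_eq, Bool.not_eq_true',
      beq_eq_false_iff_ne, not_or, not_exists] at hg
    push_neg at hg
    obtain ⟨h1, h2⟩ := hg
    by_cases he : arr = (PySem.List.dedup arr).flatMap (fun v => List.replicate v.toNat v)
    · rw [if_pos (by exact beq_iff_eq.mpr he)]
      exact ⟨fun _ => ⟨fun v hv => by have := h1 v hv; omega, by simpa using h2, he⟩, fun _ => rfl⟩
    · rw [if_neg (by simpa using he)]
      constructor
      · intro h; exact absurd h (by decide)
      · rintro ⟨_, _, hf⟩; exact absurd hf he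

theorem alt_mem (arr : List Int) : isPacked_alt arr = 0 ∨ isPacked_alt arr = 1 := by
  unfold isPacked_alt
  by_cases h1 : ((PySem.List.dedup arr).any fun v => decide (v ≤ 0)) || !((PySem.List.dedup arr).sum == (arr.length : Int))
  · rw [if_pos h1]; left; rfl
  · rw [if_neg h1]
    by_cases h2 : (arr == (PySem.List.dedup arr).flatMap (fun v => List.replicate v.toNat v)) = true
    · rw [if_pos h2]; right; rfl
    · rw [if_neg h2]; left; rfl

-- ===== VERDICT (by name: the statement is the Claim_ definition above) =====
theorem isPacked_spec : Claim_equal_isPacked := by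
  intro arr _
  unfold Spec_isPacked
  have hA : isPacked arr = gValidate (G arr) PySem.Set.empty := by
    unfold isPacked
    have := aLoop_eq arr (arr.length + 1) 0 PySem.Set.empty (by omega) (by omega) ?_
    · simpa using this
    · intro v; simp [PySem.Set.empty, PySem.Set.contains]
  rw [hA]
  have hiff : gValidate (G arr) PySem.Set.empty = 1 ↔ isPacked_alt arr = 1 :=
    (main_iff arr).trans (alt_eq_one arr).symm
  rcases gValidate_mem (G arr) PySem.Set.empty with h | h <;>
    rcases alt_mem arr with h' | h'
  · rw [h, h']
  · exfalso
    have hg := hiff.mpr h'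
    rw [h] at hg
    exact absurd hg (by decide)
  · exfalso
    have hg := hiff.mp h
    rw [h'] at hg
    exact absurd hg (by decide)
  · rw [h, h']
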